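-- pv_equiv track=rewrite | github.com/gwcat0506/CODING_TEST | PYTHON_CODING_TEST/2022/8958.py | ox_print
-- ===== SOURCE A (Python) =====
-- def ox_print(ox_list):
--     ox_score_list = []
--
--     for ox in ox_list:
--         cnt = 0
--         score = 0
--
--         for i in ox:
--             if i == 'X':
--                 cnt = 0
--             if i == 'O':
--                 cnt+=1
--                 score+=cnt
--         ox_score_list.append(score)
--
--     return ox_score_list
-- ===== SOURCE B (Python) =====
-- def ox_print(ox_list):
--     def tri(n):
--         return n * (n + 1) // 2
--     return [sum(tri(seg.count('O')) for seg in ox.split('X')) for ox in ox_list]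
-- ===== Notes on version B (the rewrite author's own statement) =====
-- stated objective: simpler
-- what changed: Replaces A's character-by-character running counter (reset on 'X', incremented and accumulated on 'O') with a one-line comprehension that splits each string on 'X' and sums the closed-form triangular number k*(k+1)//2 of the 'O'-count of each segment.
import Mathlib
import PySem

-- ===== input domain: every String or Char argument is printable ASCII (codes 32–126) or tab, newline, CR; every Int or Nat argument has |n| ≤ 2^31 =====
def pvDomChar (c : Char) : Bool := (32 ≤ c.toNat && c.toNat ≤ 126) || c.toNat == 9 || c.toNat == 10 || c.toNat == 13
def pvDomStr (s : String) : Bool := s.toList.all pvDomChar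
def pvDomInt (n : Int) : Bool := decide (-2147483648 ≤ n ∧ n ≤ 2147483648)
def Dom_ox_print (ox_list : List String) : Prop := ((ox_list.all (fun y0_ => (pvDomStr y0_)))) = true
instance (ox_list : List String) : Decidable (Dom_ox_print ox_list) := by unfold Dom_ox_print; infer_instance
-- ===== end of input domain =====

-- B replaces A's character-by-character running counter with split-on-'X' segments and a
-- closed-form triangular number per segment (objective: simpler).

-- ===== PORT A =====
-- A's inner loop state: (cnt, score); 'if i == X: cnt = 0' then 'if i == O: cnt += 1; score += cnt'
def oxStepA (p : Int × Int) (i : Char) : Int × Int :=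
  let cnt := if i == 'X' then (0 : Int) else p.1
  if i == 'O' then (cnt + 1, p.2 + (cnt + 1)) else (cnt, p.2)

def ox_print (ox_list : List String) : List Int :=
  ox_list.foldl (fun ox_score_list ox =>
    ox_score_list ++ [(ox.toList.foldl oxStepA (0, 0)).2]) []

-- ===== PORT B =====
-- tri(n) = n * (n + 1) // 2
def oxTriB (n : Int) : Int := PySem.Int.floordiv (n * (n + 1)) 2

def ox_print_alt (ox_list : List String) : List Int :=
  ox_list.map (fun ox =>
    ((PySem.Chars.splitOn ox.toList "X".toList).map
      (fun seg => oxTriB (PySem.Chars.count seg "O".toList))).sum)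

-- ===== PRECONDITION & SPEC =====
def Spec_ox_print (ox_list : List String) (out : List Int) : Prop := out = ox_print_alt ox_list
instance (ox_list : List String) (out : List Int) : Decidable (Spec_ox_print ox_list out) := by unfold Spec_ox_print; infer_instance

-- ===== CLAIM (what is proved, stated in full; the proofs are below) =====
def Claim_equal_ox_print : Prop := ∀ (ox_list : List String), Dom_ox_print ox_list → Spec_ox_print ox_list (ox_print ox_list)

-- ===== LEMMAS AND PROOFS =====

-- recursive characterisation of splitting on 'X'
def oxSegs : List Char → List (List Char)
  | [] => [[]]
  | c :: t => if c = 'X' then [] :: oxSegs t else (oxSegs t).modifyHead (c :: ·)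

-- triangular numbers by recursion (proof-side view of oxTriB on naturals)
def oxTriN : Nat → Int
  | 0 => 0
  | k + 1 => oxTriN k + (k : Int) + 1

theorem oxSegs_ne_nil (cs : List Char) : oxSegs cs ≠ [] := by
  induction cs with
  | nil => simp [oxSegs]
  | cons c t ih =>
    simp only [oxSegs]
    split_ifs
    · simp
    · cases h : oxSegs t with
      | nil => exact absurd h ih
      | cons a b => simp [List.modifyHead]

theorem oxCount_go_eq (fuel : Nat) (s : List Char) (acc : Nat) (h : s.length ≤ fuel) :
    PySem.Chars.count.go ['O'] fuel s acc = acc + s.count 'O' := by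
  induction fuel generalizing s acc with
  | zero =>
    rw [PySem.Chars.count.go.eq_def]
    cases s with
    | nil => simp
    | cons c t => simp at h
  | succ fuel ih =>
    rw [PySem.Chars.count.go.eq_def]
    cases s with
    | nil => simp
    | cons c t =>
      simp only [List.length_cons, Nat.succ_le_succ_iff] at h
      by_cases hc : c = 'O'
      · subst hc
        simp only [List.isPrefixOf, BEq.rfl, Bool.and_self, if_true, List.length_cons, List.length_nil, List.drop_succ_cons, List.drop_zero]
        rw [ih t (acc + 1) h]
        simp
        omega
      · have hpre : (['O'].isPrefixOf (c :: t)) = false := by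
          simp [List.isPrefixOf]
          exact fun h' => hc h'.symm
        simp only [hpre, Bool.false_eq_true, if_false]
        rw [ih t acc h]
        simp [hc]

theorem oxCount_eq (s : List Char) : PySem.Chars.count s ['O'] = s.count 'O' := by
  simp only [PySem.Chars.count, List.isEmpty_cons, Bool.false_eq_true, if_false]
  simpa using oxCount_go_eq s.length s 0 (le_refl _)

theorem oxSplit_go_eq (fuel : Nat) (l cur : List Char) (acc : List (List Char))
    (h : l.length ≤ fuel) :
    PySem.Chars.splitOn.go ['X'] fuel l cur acc =
      acc.reverse ++ (oxSegs l).modifyHead (cur.reverse ++ ·) := by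
  induction fuel generalizing l cur acc with
  | zero =>
    rw [PySem.Chars.splitOn.go.eq_def]
    cases l with
    | nil => simp [oxSegs, List.modifyHead]
    | cons c t => simp at h
  | succ fuel ih =>
    rw [PySem.Chars.splitOn.go.eq_def]
    cases l with
    | nil => simp [oxSegs, List.modifyHead]
    | cons c t =>
      simp only [List.length_cons, Nat.succ_le_succ_iff] at h
      by_cases hc : c = 'X'
      · subst hc
        simp only [List.isPrefixOf, BEq.rfl, Bool.and_self, if_true, List.length_cons, List.length_nil, List.drop_succ_cons, List.drop_zero]
        rw [ih t [] (cur.reverse :: acc) h]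
        obtain ⟨a, b, hab⟩ : ∃ a b, oxSegs t = a :: b := by
          cases hs : oxSegs t with
          | nil => exact absurd hs (oxSegs_ne_nil t)
          | cons a b => exact ⟨a, b, rfl⟩
        simp [oxSegs, hab, List.modifyHead]
      · have hpre : (['X'].isPrefixOf (c :: t)) = false := by
          simp [List.isPrefixOf]
          exact fun h' => hc h'.symm
        simp only [hpre, Bool.false_eq_true, if_false]
        rw [ih t (c :: cur) acc h]
        obtain ⟨a, b, hab⟩ : ∃ a b, oxSegs t = a :: b := by
          cases hs : oxSegs t with
          | nil => exact absurd hs (oxSegs_ne_nil t)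
          | cons a b => exact ⟨a, b, rfl⟩
        simp [oxSegs, hc, hab, List.modifyHead]

theorem oxSplit_eq (cs : List Char) : PySem.Chars.splitOn cs ['X'] = oxSegs cs := by
  have := oxSplit_go_eq (cs.length + 1) cs [] [] (by omega)
  simp only [PySem.Chars.splitOn] at *
  rw [this]
  obtain ⟨a, b, hab⟩ : ∃ a b, oxSegs cs = a :: b := by
    cases hs : oxSegs cs with
    | nil => exact absurd hs (oxSegs_ne_nil cs)
    | cons a b => exact ⟨a, b, rfl⟩
  simp [hab, List.modifyHead]

theorem oxTriB_natCast (k : Nat) : oxTriB (k : Int) = oxTriN k := by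
  induction k with
  | zero => simp [oxTriB, oxTriN, PySem.Int.floordiv]
  | succ k ih =>
    simp only [oxTriB, oxTriN] at *
    rw [PySem.Int.floordiv_eq_ediv_of_pos (by omega : (0:Int) < 2)] at ih ⊢
    push_cast
    have hexp : ((k:Int) + 1) * ((k:Int) + 1 + 1) = (k:Int) * ((k:Int) + 1) + ((k:Int) + 1) * 2 := by
      ring
    rw [hexp, Int.add_mul_ediv_right _ _ (by omega : (2:Int) ≠ 0), ih]
    ring

theorem oxSegs_head_tail (cs : List Char) :
    ∃ a b, oxSegs cs = a :: b := by
  cases hs : oxSegs cs with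
  | nil => exact absurd hs (oxSegs_ne_nil cs)
  | cons a b => exact ⟨a, b, rfl⟩

-- A's inner loop equals the segment closed form, with the running counter cnt folded into
-- the triangular number of the first segment.
theorem oxLoopA_eq (cs : List Char) (cnt : Nat) (score : Int) :
    (cs.foldl oxStepA ((cnt : Int), score)).2 =
      score - oxTriN cnt +
        (oxTriN (cnt + ((oxSegs cs).headI).count 'O') +
          (((oxSegs cs).tail).map (fun seg => oxTriN (seg.count 'O'))).sum) := by
  induction cs generalizing cnt score with
  | nil => simp [oxSegs]
  | cons c t ih =>
    obtain ⟨a, b, hab⟩ := oxSegs_head_tail t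
    by_cases hX : c = 'X'
    · subst hX
      have hstep : oxStepA ((cnt : Int), score) 'X' = ((0 : Int), score) := by
        simp [oxStepA]
      simp only [List.foldl_cons, hstep]
      have := ih 0 score
      simp only [Nat.cast_zero] at this
      rw [this]
      simp [oxSegs, hab, oxTriN]
      ring
    · by_cases hO : c = 'O'
      · subst hO
        have hstep : oxStepA ((cnt : Int), score) 'O' =
            (((cnt + 1 : Nat) : Int), score + ((cnt : Int) + 1)) := by
          simp [oxStepA]
        simp only [List.foldl_cons, hstep]
        rw [ih (cnt + 1) (score + ((cnt : Int) + 1))]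
        simp [oxSegs, hab, List.modifyHead]
        have e1 : cnt + 1 + a.count 'O' = cnt + (a.count 'O' + 1) := by omega
        rw [e1, show oxTriN (cnt + 1) = oxTriN cnt + (cnt : Int) + 1 from rfl]
        ring
      · have hstep : oxStepA ((cnt : Int), score) c = ((cnt : Int), score) := by
          simp [oxStepA, hX, hO]
        simp only [List.foldl_cons, hstep]
        rw [ih cnt score]
        simp [oxSegs, hX, hab, List.modifyHead, hO]

theorem ox_one_eq (ox : String) :
    (ox.toList.foldl oxStepA (0, 0)).2 =
      ((PySem.Chars.splitOn ox.toList "X".toList).map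
        (fun seg => oxTriB (PySem.Chars.count seg "O".toList))).sum := by
  have hX : "X".toList = ['X'] := rfl
  have hO : "O".toList = ['O'] := rfl
  rw [hX, hO, oxSplit_eq]
  have hmap : (oxSegs ox.toList).map (fun seg => oxTriB (PySem.Chars.count seg ['O'])) =
      (oxSegs ox.toList).map (fun seg => oxTriN (seg.count 'O')) := by
    apply List.map_congr_left
    intro seg _
    rw [oxCount_eq, oxTriB_natCast]
  rw [hmap]
  obtain ⟨a, b, hab⟩ := oxSegs_head_tail ox.toList
  have := oxLoopA_eq ox.toList 0 0
  simp only [Nat.cast_zero] at this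
  rw [this]
  simp [hab, oxTriN]

theorem ox_print_spec : Claim_equal_ox_print := by
  intro ox_list _
  unfold Spec_ox_print ox_print ox_print_alt
  rw [PySem.List.foldl_append_singleton_eq_map]
  apply List.map_congr_left
  intro ox _
  exact ox_one_eq ox
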